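-- pv_equiv track=rewrite | github.com/Hokimastah/kuliahkuu | Python/Kuliah/Daspro/soal kelas/pola_saputangan_belahketupat.py | kocak
-- ===== SOURCE A (Python) =====
-- def kocak(a):
--     b = []
--     for i in range(a + 1):
--         b.append(i)
--     for i in range(a):
--         b.append(a - (i + 1))
--     c = " ".join(map(str, b))
--     return c
-- ===== SOURCE B (Python) =====
-- def kocak(a):
--     return " ".join(str(a - abs(k - a)) for k in range(2 * a + 1))
-- ===== Notes on version B (the rewrite author's own statement) =====
-- stated objective: simpler
-- what changed: Replaces the two up/down append loops with a single closed-form map a - |k - a| over one index range 0..2a, joined directly.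
import Mathlib
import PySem

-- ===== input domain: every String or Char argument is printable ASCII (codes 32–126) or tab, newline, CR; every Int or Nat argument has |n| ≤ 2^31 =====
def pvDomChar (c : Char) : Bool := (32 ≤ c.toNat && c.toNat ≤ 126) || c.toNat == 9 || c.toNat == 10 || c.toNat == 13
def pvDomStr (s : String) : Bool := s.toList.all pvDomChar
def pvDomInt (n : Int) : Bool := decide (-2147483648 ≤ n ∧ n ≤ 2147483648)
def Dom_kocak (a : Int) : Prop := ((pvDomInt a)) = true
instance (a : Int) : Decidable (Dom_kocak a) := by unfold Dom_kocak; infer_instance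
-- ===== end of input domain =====

-- B replaces A's two up/down append loops by one closed-form map a - |k - a| over a single range (simpler decomposition).

-- ===== PORT A =====
def kocak (a : Int) : String :=
  let b : List Int := (PySem.List.pyRange 0 (a + 1) 1).foldl (fun acc i => acc ++ [i]) []
  let b : List Int := (PySem.List.pyRange 0 a 1).foldl (fun acc i => acc ++ [a - (i + 1)]) b
  PySem.Str.join " " (b.map PySem.Int.toStr)

-- ===== PORT B =====
def kocak_alt (a : Int) : String :=
  PySem.Str.join " " (((PySem.List.pyRange 0 (2 * a + 1) 1).map (fun k => a - |k - a|)).map PySem.Int.toStr)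

-- ===== PRECONDITION & SPEC =====
def Spec_kocak (a : Int) (out : String) : Prop := out = kocak_alt a
instance (a : Int) (out : String) : Decidable (Spec_kocak a out) := by unfold Spec_kocak; infer_instance

-- ===== CLAIM (what is proved, stated in full; the proofs are below) =====
def Claim_equal_kocak : Prop := ∀ (a : Int), Dom_kocak a → Spec_kocak a (kocak a)

-- ===== LEMMAS AND PROOFS =====

-- the two ports build the same list of numbers
theorem kocak_lists (a : Int) :
    PySem.List.pyRange 0 (a + 1) 1 ++ (PySem.List.pyRange 0 a 1).map (fun i => a - (i + 1))
      = (PySem.List.pyRange 0 (2 * a + 1) 1).map (fun k => a - |k - a|) := by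
  by_cases h : a ≤ -1
  · rw [PySem.List.pyRange_one_eq_nil (by omega), PySem.List.pyRange_one_eq_nil (by omega),
        PySem.List.pyRange_one_eq_nil (by omega)]
    simp
  · push_neg at h
    have ha : 0 ≤ a := by omega
    rw [PySem.List.pyRange_one_append 0 (a + 1) (2 * a + 1) (by omega) (by omega)]
    rw [List.map_append]
    congr 1
    · symm
      refine (List.map_congr_left ?_).trans (List.map_id _)
      intro k hk
      rw [PySem.List.mem_pyRange_one] at hk
      have : |k - a| = a - k := by
        rw [abs_of_nonpos (by omega)]; omega
      simp [this]
    · rw [PySem.List.pyRange_one 0 a, PySem.List.pyRange_one (a + 1) (2 * a + 1), List.map_map, List.map_map]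
      have hlen : (2 * a + 1 - (a + 1)).toNat = (a - 0).toNat := by omega
      rw [hlen]
      refine List.map_congr_left ?_
      intro k _
      have hk : (0 : Int) ≤ (k : Int) := Int.natCast_nonneg k
      simp only [Function.comp]
      have : |(a + 1 + (k : Int)) - a| = (k : Int) + 1 := by
        rw [abs_of_nonneg (by omega)]; ring
      simp [this]

-- ===== VERDICT (by name: the statement is the Claim_ definition above) =====
theorem kocak_spec : Claim_equal_kocak := by
  intro a _
  unfold Spec_kocak kocak kocak_alt
  simp only [PySem.List.foldl_append_singleton, PySem.List.foldl_append_singleton_eq_map,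
    List.nil_append]
  rw [kocak_lists]
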